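-- pv_equiv track=rewrite | github.com/mattdoug604/Rosalind | 2_bioinformatics_stronghold/rosalind_MEND.py | subtrees
-- ===== SOURCE A (Python) =====
-- def subtrees(t):
--     ''' Split a Newick formatted tree into seperate subtrees. '''
--     level = 0
--     pos = []
--     branches = []
--
--     for i in range(len(t)):
--         if t[i] == '(':
--             level += 1
--             pos.append(i)
--         elif t[i] == ')':
--             s = t[pos[-1]+1:i]
--             del pos[-1]
--
--             while len(branches) < level:
--                 branches.append([])
--
--             branches[level-1].append(s)
--             level -= 1
--
--     return branches[::-1]
-- ===== SOURCE B (Python) =====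
-- def subtrees(t):
--     ''' Split a Newick formatted tree into seperate subtrees. '''
--     depth = 0
--     branches = []
--     for i in range(len(t)):
--         c = t[i]
--         if c == '(':
--             depth += 1
--         elif c == ')':
--             # find the matching '(' by a backward counting scan
--             skip = 0
--             a = i - 1
--             while a >= 0:
--                 if t[a] == ')':
--                     skip += 1
--                 elif t[a] == '(':
--                     if skip == 0:
--                         break
--                     skip -= 1
--                 a -= 1
--             s = t[a + 1:i]
--             while len(branches) < depth:
--                 branches.append([])
--             branches[depth - 1].append(s)
--             depth -= 1
--     return branches[::-1]
-- ===== Notes on version B (the rewrite author's own statement) =====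
-- stated objective: alternative
-- what changed: B keeps no stack of opening-parenthesis positions: each closing parenthesis locates its matching opening one by a backward counting rescan of the string, and only a depth counter is carried through the single forward pass.
-- outside the precondition, e.g. on subtrees(')'): A raises IndexError, B raises IndexError
import Mathlib
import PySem

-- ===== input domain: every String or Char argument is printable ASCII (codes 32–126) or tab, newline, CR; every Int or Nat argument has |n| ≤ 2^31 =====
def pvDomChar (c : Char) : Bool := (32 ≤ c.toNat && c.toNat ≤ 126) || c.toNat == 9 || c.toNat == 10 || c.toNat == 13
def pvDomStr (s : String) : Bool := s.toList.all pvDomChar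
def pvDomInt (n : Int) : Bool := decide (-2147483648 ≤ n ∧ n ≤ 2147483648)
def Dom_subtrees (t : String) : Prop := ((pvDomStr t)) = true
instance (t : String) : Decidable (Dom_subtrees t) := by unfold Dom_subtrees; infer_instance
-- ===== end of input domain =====

-- B replaces A's stack of opening-parenthesis positions by a backward counting rescan at each close;
-- objective: alternative (no stack maintained; O(n^2) worst-case instead of O(n)).

-- helper shared by both ports: the identical Python lines
--   `while len(branches) < lvl: branches.append([])`
def padList (b : List (List String)) (lvl : Nat) : List (List String) :=
  if b.length < lvl then padList (b ++ [[]]) lvl else b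
termination_by lvl - b.length
decreasing_by simp; omega

-- helper shared by both ports: pad to idx+1 then `branches[idx].append(s)`
def recordAt (b : List (List String)) (idx : Nat) (s : String) : List (List String) :=
  let b' := padList b (idx + 1)
  b'.set idx (b'.getD idx [] ++ [s])

-- ===== PORT A =====
-- A keeps `level` coupled to the stack `pos` (level = len(pos) throughout, so Nat `level`
-- is exact); Python's append/pos[-1]/del pos[-1] is the cons-stack here; the IndexError on
-- pos[-1] with empty pos is the `none` state.  Slice t[p+1:i] has 0 ≤ p+1 ≤ i, so
-- drop/take is exact.
def stepA (cs : List Char) (st : Option (Nat × List Nat × List (List String))) (i : Nat) :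
    Option (Nat × List Nat × List (List String)) :=
  match st with
  | none => none
  | some (level, pos, branches) =>
    let c := cs.getD i ' '
    if c = '(' then some (level + 1, i :: pos, branches)
    else if c = ')' then
      match pos with
      | [] => none                     -- Python: IndexError on pos[-1]
      | p :: rest =>
        let s := String.mk ((cs.drop (p + 1)).take (i - (p + 1)))
        some (level - 1, rest, recordAt branches (level - 1) s)
    else st

def subtrees (t : String) : List (List String) :=
  let cs := t.toList
  match (List.range cs.length).foldl (stepA cs) (some (0, [], [])) with
  | some (_, _, branches) => branches.reverse
  | none => []                         -- Python raises here; excluded by Pre_subtrees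

-- ===== PORT B =====
-- backward scan of Source B: first argument is a+1 (so 0 encodes a = -1); returns the Python `a`.
def bscanB (cs : List Char) : Nat → Nat → Int
  | 0, _ => -1
  | a + 1, skip =>
    let c := cs.getD a ' '
    if c = ')' then bscanB cs a (skip + 1)
    else if c = '(' then (if skip = 0 then (a : Int) else bscanB cs a (skip - 1))
    else bscanB cs a skip

-- B's `while len(branches) < depth` + `branches[depth-1].append(s)` with Python's Int
-- `depth` and negative-index rule (branches[-k] = branches[len-k]; out of range would be
-- an IndexError, which Python reaches only outside Pre_subtrees, where it keeps b).
def recordAtB (b : List (List String)) (depth : Int) (s : String) : List (List String) :=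
  let b' := padList b depth.toNat
  let j := if depth - 1 < 0 then (b'.length : Int) + (depth - 1) else depth - 1
  if 0 ≤ j ∧ j < (b'.length : Int) then b'.set j.toNat (b'.getD j.toNat [] ++ [s])
  else b'

def stepB (cs : List Char) (st : Int × List (List String)) (i : Nat) :
    Int × List (List String) :=
  let (depth, branches) := st
  let c := cs.getD i ' '
  if c = '(' then (depth + 1, branches)
  else if c = ')' then
    let a := bscanB cs i 0
    let s := String.mk ((cs.drop (a + 1).toNat).take (i - (a + 1).toNat))
    (depth - 1, recordAtB branches depth s)
  else st

def subtrees_alt (t : String) : List (List String) :=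
  let cs := t.toList
  ((List.range cs.length).foldl (stepB cs) ((0 : Int), [])).2.reverse

-- ===== PRECONDITION & SPEC =====
-- Pre_ excludes exactly the inputs on which A raises IndexError: some prefix of t contains
-- more closing than opening parentheses (pos[-1] on an empty stack).  A returns on every other string.
def Pre_subtrees (t : String) : Prop :=
  ∀ k, k ≤ t.toList.length →
    (t.toList.take k).count ')' ≤ (t.toList.take k).count '('

instance (t : String) : Decidable (Pre_subtrees t) := by unfold Pre_subtrees; infer_instance

def pvWitness_subtrees : String := "(dog,(cat,rat));"

def Spec_subtrees (t : String) (out : List (List String)) : Prop := out = subtrees_alt t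
instance (t : String) (out : List (List String)) : Decidable (Spec_subtrees t out) := by
  unfold Spec_subtrees; infer_instance

-- ===== CLAIM (what is proved, stated in full; the proofs are below) =====
def Claim_equal_subtrees : Prop :=
  ∀ (t : String), Dom_subtrees t → Pre_subtrees t → Spec_subtrees t (subtrees t)

-- ===== LEMMAS AND PROOFS =====

-- the stack of unmatched opening-parenthesis positions after reading cs[0..i)
def stk (cs : List Char) : Nat → List Nat
  | 0 => []
  | i + 1 =>
    let c := cs.getD i ' '
    if c = '(' then i :: stk cs i
    else if c = ')' then (stk cs i).tail
    else stk cs i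

-- the backward scan reads off the stack: entry `skip`, or -1 when the stack is shorter
lemma bscan_stk (cs : List Char) :
    ∀ i skip, bscanB cs i skip = ((stk cs i)[skip]?).elim (-1) (fun p => (p : Int)) := by
  intro i
  induction i with
  | zero => intro skip; simp [bscanB, stk]
  | succ i ih =>
    intro skip
    by_cases h1 : cs[i]?.getD ' ' = ')'
    · simp [bscanB, stk, h1, ih, List.getElem?_tail]
    · by_cases h2 : cs[i]?.getD ' ' = '('
      · rcases Nat.eq_zero_or_pos skip with hs | hs
        · subst hs; simp [bscanB, stk, h1, h2]
        · have hne : skip ≠ 0 := Nat.pos_iff_ne_zero.mp hs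
          obtain ⟨k, rfl⟩ := Nat.exists_eq_succ_of_ne_zero hne
          simp [bscanB, stk, h1, h2, ih]
      · simp [bscanB, stk, h1, h2, ih]

lemma padList_length_aux : ∀ (k : Nat) (b : List (List String)) (m : Nat),
    m - b.length ≤ k → (padList b m).length = max b.length m := by
  intro k
  induction k with
  | zero =>
    intro b m h
    rw [padList, if_neg (by omega)]
    omega
  | succ k ih =>
    intro b m h
    by_cases hb : b.length < m
    · rw [padList, if_pos hb, ih (b ++ [[]]) m (by simp; omega)]
      simp
      omega
    · rw [padList, if_neg hb]
      omega

lemma padList_length (b : List (List String)) (m : Nat) :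
    (padList b m).length = max b.length m :=
  padList_length_aux (m - b.length) b m le_rfl

-- on the in-range side (depth = n ≥ 1) B's record is A's record at index n-1
lemma recordAtB_eq (b : List (List String)) (n : Nat) (s : String) (h : 1 ≤ n) :
    recordAtB b (n : Int) s = recordAt b (n - 1) s := by
  unfold recordAtB recordAt
  have h1 : ((n : Int)).toNat = n := Int.toNat_natCast n
  have h2 : ¬ ((n : Int) - 1 < 0) := by omega
  have h3 : ((n : Int) - 1).toNat = n - 1 := by omega
  have h4 : n - 1 + 1 = n := by omega
  have h5 : n ≤ (padList b n).length := by rw [padList_length]; omega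
  simp only [h1, h2, if_false, h3, h4]
  rw [if_pos]
  omega

set_option maxRecDepth 4000 in
-- main invariant: after i steps the two folds agree (A's level and stack are stk cs i),
-- and the prefix balance equals the stack height
lemma main_inv (cs : List Char) (hpre : ∀ k, k ≤ cs.length →
      (cs.take k).count ')' ≤ (cs.take k).count '(') :
    ∀ i, i ≤ cs.length →
      ∃ b, (List.range i).foldl (stepA cs) (some (0, [], [])) =
              some ((stk cs i).length, stk cs i, b) ∧
           (List.range i).foldl (stepB cs) ((0 : Int), []) = (((stk cs i).length : Int), b) ∧
           (cs.take i).count '(' = (cs.take i).count ')' + (stk cs i).length := by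
  intro i
  induction i with
  | zero => intro _; exact ⟨[], by simp [stk], by simp [stk], by simp [stk]⟩
  | succ i ih =>
    intro hi
    obtain ⟨b, hA, hB, hc⟩ := ih (Nat.le_of_succ_le hi)
    have hlt : i < cs.length := hi
    have htake : cs.take (i + 1) = cs.take i ++ [cs[i]?.getD ' '] := by
      rw [List.take_add_one, List.getElem?_eq_getElem hlt]
      rfl
    have hr : List.range (i + 1) = List.range i ++ [i] := List.range_succ
    by_cases h1 : cs[i]?.getD ' ' = '('
    · have hstk : stk cs (i + 1) = i :: stk cs i := by simp [stk, h1]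
      refine ⟨b, ?_, ?_, ?_⟩
      · rw [hr, List.foldl_append, hA]; simp [stepA, h1, hstk]
      · rw [hr, List.foldl_append, hB]; simp [stepB, h1, hstk]
      · rw [htake, hstk]; simp [List.count_append, h1, hc]; omega
    · by_cases h2 : cs[i]?.getD ' ' = ')'
      · -- the stack is nonempty: the prefix balance at i+1 stays ≥ 0
        have hbal := hpre (i + 1) hlt
        rw [htake] at hbal
        simp [List.count_append, h2] at hbal
        have hne : stk cs i ≠ [] := by
          intro he; rw [he] at hc; simp at hc; omega
        obtain ⟨p, rest, hpr⟩ := List.exists_cons_of_ne_nil hne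
        have hstk : stk cs (i + 1) = rest := by simp [stk, h1, h2, hpr]
        have hlen : (stk cs i).length = rest.length + 1 := by rw [hpr]; rfl
        have hb0 : bscanB cs i 0 = (p : Int) := by rw [bscan_stk, hpr]; rfl
        refine ⟨recordAt b ((stk cs i).length - 1)
            (String.mk ((cs.drop (p + 1)).take (i - (p + 1)))), ?_, ?_, ?_⟩
        · rw [hr, List.foldl_append, hA]
          simp [stepA, h1, h2, hpr, hstk, hlen]
        · rw [hr, List.foldl_append, hB]
          have hrec := recordAtB_eq b (stk cs i).length
            (String.mk ((cs.drop (p + 1)).take (i - (p + 1)))) (by omega)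
          simp [stepB, h1, h2, hb0, hstk, hlen] at hrec ⊢
          rw [← hrec]
        · rw [htake, hstk]
          simp [List.count_append, h1, h2] at *
          omega
      · have hstk : stk cs (i + 1) = stk cs i := by simp [stk, h1, h2]
        refine ⟨b, ?_, ?_, ?_⟩
        · rw [hr, List.foldl_append, hA]; simp [stepA, h1, h2, hstk]
        · rw [hr, List.foldl_append, hB]; simp [stepB, h1, h2, hstk]
        · rw [htake, hstk]; simp [List.count_append, h1, h2, hc]

-- ===== VERDICT (by name: the statement is the Claim_ definition above) =====
theorem subtrees_spec : Claim_equal_subtrees := by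
  intro t _ hpre
  unfold Spec_subtrees subtrees subtrees_alt
  obtain ⟨b, hA, hB, -⟩ := main_inv t.toList hpre t.toList.length le_rfl
  simp only [String.length_toList] at hA hB
  simp [hA, hB]
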